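-- pv_equiv track=rewrite | github.com/benquick123/code-profiling | code/batch-2/vse-naloge-brez-testov/DN7-M-095.py | varen_premik
-- ===== SOURCE A (Python) =====
-- def varen_premik(x0, y0, x1, y1, mine):
--     """
--     Vrni `True`, če je pomik z (x0, y0) and (x1, y1) varen, `False`, če ni.
--
--     Args:
--         x0 (int): koordinata x začetnega polja
--         y0 (int): koordinata y začetnega polja
--         x1 (int): koordinata x končnega polja
--         y1 (int): koordinata y končnega polja
--         mine (set of tuple of int): koordinate min
--
--     Returns:
--         bool: `True`, če je premik varen, `False`, če ni.
--     """
--     if x0 == x1: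
--         if y1 > y0:
--             i = y1
--             j = y0
--         else:
--             i = y0
--             j = y1
--         while j <= i:
--             if (x0, j) in mine:
--                 return False
--             j += 1
--
--     if y0 == y1:
--         if x1 > x0:
--             i = x1
--             j = x0
--         else:
--             i = x0
--             j = x1
--         while j <= i:
--             if (j, y0) in mine:
--                 return False
--             j += 1
--     return True
-- ===== SOURCE B (Python) =====
-- def varen_premik(x0, y0, x1, y1, mine):
--     for mx, my in mine:
--         if x0 == x1 and mx == x0 and min(y0, y1) <= my <= max(y0, y1):
--             return False
--         if y0 == y1 and my == y0 and min(x0, x1) <= mx <= max(x0, x1):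
--             return False
--     return True
-- ===== Notes on version B (the rewrite author's own statement) =====
-- stated objective: faster
-- what changed: Instead of scanning every cell of the segment and testing set membership per cell, B iterates once over the mines and tests each mine against the segment's axis and inclusive coordinate range.
import Mathlib
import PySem

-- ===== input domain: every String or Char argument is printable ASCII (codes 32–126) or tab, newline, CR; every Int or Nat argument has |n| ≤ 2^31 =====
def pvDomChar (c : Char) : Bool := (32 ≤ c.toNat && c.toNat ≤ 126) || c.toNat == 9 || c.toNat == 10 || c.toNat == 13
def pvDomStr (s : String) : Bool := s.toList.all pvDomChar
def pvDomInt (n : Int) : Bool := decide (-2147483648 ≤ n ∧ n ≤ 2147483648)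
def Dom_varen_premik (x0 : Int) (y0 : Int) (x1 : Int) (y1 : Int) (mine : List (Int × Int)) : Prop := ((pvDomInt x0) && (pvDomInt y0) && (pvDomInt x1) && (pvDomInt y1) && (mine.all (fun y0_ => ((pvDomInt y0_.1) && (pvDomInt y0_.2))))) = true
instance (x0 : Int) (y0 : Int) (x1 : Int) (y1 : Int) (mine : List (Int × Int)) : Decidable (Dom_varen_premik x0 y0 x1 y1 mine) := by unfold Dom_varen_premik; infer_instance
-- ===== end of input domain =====

-- B iterates once over the mines instead of scanning every cell of the segment; same return value.


-- ===== PORT A =====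
-- 'while j <= i: if (x0, j) in mine: return False; j += 1' (vertical scan)
def loopY (x0 : Int) (j : Int) (i : Int) (mine : List (Int × Int)) : Bool :=
  if j ≤ i then
    if (x0, j) ∈ mine then false
    else loopY x0 (j + 1) i mine
  else true
termination_by (i + 1 - j).toNat
decreasing_by omega

-- 'while j <= i: if (j, y0) in mine: return False; j += 1' (horizontal scan)
def loopX (y0 : Int) (j : Int) (i : Int) (mine : List (Int × Int)) : Bool :=
  if j ≤ i then
    if (j, y0) ∈ mine then false
    else loopX y0 (j + 1) i mine
  else true
termination_by (i + 1 - j).toNat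
decreasing_by omega

def varen_premik (x0 : Int) (y0 : Int) (x1 : Int) (y1 : Int) (mine : List (Int × Int)) : Bool :=
  let part1 : Bool :=
    if x0 = x1 then
      if y1 > y0 then loopY x0 y0 y1 mine else loopY x0 y1 y0 mine
    else true
  if part1 then
    if y0 = y1 then
      if x1 > x0 then loopX y0 x0 x1 mine else loopX y0 x1 x0 mine
    else true
  else false

-- ===== PORT B =====
def varen_premik_alt (x0 : Int) (y0 : Int) (x1 : Int) (y1 : Int) (mine : List (Int × Int)) : Bool :=
  mine.all (fun m =>
    !(decide (x0 = x1 ∧ m.1 = x0 ∧ min y0 y1 ≤ m.2 ∧ m.2 ≤ max y0 y1)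
      || decide (y0 = y1 ∧ m.2 = y0 ∧ min x0 x1 ≤ m.1 ∧ m.1 ≤ max x0 x1)))

-- ===== PRECONDITION & SPEC =====
def Spec_varen_premik (x0 : Int) (y0 : Int) (x1 : Int) (y1 : Int) (mine : List (Int × Int)) (out : Bool) : Prop := out = varen_premik_alt x0 y0 x1 y1 mine
instance (x0 : Int) (y0 : Int) (x1 : Int) (y1 : Int) (mine : List (Int × Int)) (out : Bool) : Decidable (Spec_varen_premik x0 y0 x1 y1 mine out) := by unfold Spec_varen_premik; infer_instance

-- ===== CLAIM (what is proved, stated in full; the proofs are below) =====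
def Claim_equal_varen_premik : Prop := ∀ (x0 : Int) (y0 : Int) (x1 : Int) (y1 : Int) (mine : List (Int × Int)), Dom_varen_premik x0 y0 x1 y1 mine → Spec_varen_premik x0 y0 x1 y1 mine (varen_premik x0 y0 x1 y1 mine)

-- ===== LEMMAS AND PROOFS =====

theorem loopY_true_iff (x0 j i : Int) (mine : List (Int × Int)) :
    loopY x0 j i mine = true ↔ ∀ k : Int, j ≤ k → k ≤ i → (x0, k) ∉ mine := by
  fun_induction loopY x0 j i mine with
  | case1 j h hm =>
      simp only [Bool.false_eq_true, false_iff]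
      push Not
      exact ⟨j, le_refl j, h, hm⟩
  | case2 j h hm ih =>
      rw [ih]
      constructor
      · intro H k hk1 hk2
        rcases eq_or_lt_of_le hk1 with rfl | hlt
        · exact hm
        · exact H k (by omega) hk2
      · intro H k hk1 hk2
        exact H k (by omega) hk2
  | case3 j h =>
      simp only [true_iff]
      intro k hk1 hk2
      omega

theorem loopX_true_iff (y0 j i : Int) (mine : List (Int × Int)) :
    loopX y0 j i mine = true ↔ ∀ k : Int, j ≤ k → k ≤ i → (k, y0) ∉ mine := by
  fun_induction loopX y0 j i mine with
  | case1 j h hm =>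
      simp only [Bool.false_eq_true, false_iff]
      push Not
      exact ⟨j, le_refl j, h, hm⟩
  | case2 j h hm ih =>
      rw [ih]
      constructor
      · intro H k hk1 hk2
        rcases eq_or_lt_of_le hk1 with rfl | hlt
        · exact hm
        · exact H k (by omega) hk2
      · intro H k hk1 hk2
        exact H k (by omega) hk2
  | case3 j h =>
      simp only [true_iff]
      intro k hk1 hk2
      omega

theorem alt_true_iff (x0 y0 x1 y1 : Int) (mine : List (Int × Int)) :
    varen_premik_alt x0 y0 x1 y1 mine = true ↔
      ∀ m ∈ mine,
        ¬(x0 = x1 ∧ m.1 = x0 ∧ min y0 y1 ≤ m.2 ∧ m.2 ≤ max y0 y1) ∧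
        ¬(y0 = y1 ∧ m.2 = y0 ∧ min x0 x1 ≤ m.1 ∧ m.1 ≤ max x0 x1) := by
  unfold varen_premik_alt
  simp only [List.all_eq_true, Bool.not_eq_true', Bool.or_eq_false_iff,
    decide_eq_false_iff_not]

theorem a_true_iff (x0 y0 x1 y1 : Int) (mine : List (Int × Int)) :
    varen_premik x0 y0 x1 y1 mine = true ↔
      ((x0 = x1 → ∀ k : Int, min y0 y1 ≤ k → k ≤ max y0 y1 → (x0, k) ∉ mine) ∧
       (y0 = y1 → ∀ k : Int, min x0 x1 ≤ k → k ≤ max x0 x1 → (k, y0) ∉ mine)) := by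
  unfold varen_premik
  split_ifs with hx hgy hy hgx hy' hgx' <;>
    simp_all [loopY_true_iff, loopX_true_iff, Int.min_def, Int.max_def] <;>
    (constructor <;> intro H k h1 h2 <;> apply H k <;> omega)

-- ===== VERDICT (by name: the statement is the Claim_ definition above) =====
theorem varen_premik_spec : Claim_equal_varen_premik := by
  intro x0 y0 x1 y1 mine _
  unfold Spec_varen_premik
  rw [Bool.eq_iff_iff, a_true_iff, alt_true_iff]
  constructor
  · intro ⟨H1, H2⟩ m hm
    refine ⟨fun ⟨hx, hmx, h1, h2⟩ => ?_, fun ⟨hy, hmy, h1, h2⟩ => ?_⟩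
    · exact H1 hx m.2 h1 h2 (by rw [← hmx]; exact hm)
    · exact H2 hy m.1 h1 h2 (by rw [← hmy]; exact hm)
  · intro H
    refine ⟨fun hx k h1 h2 hk => ?_, fun hy k h1 h2 hk => ?_⟩
    · exact (H _ hk).1 ⟨hx, rfl, h1, h2⟩
    · exact (H _ hk).2 ⟨hy, rfl, h1, h2⟩
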